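-- pv_equiv track=rewrite | github.com/jcai0o0/Big-Data-Management | project3/part1_query2.py | expand_coordinates
-- ===== SOURCE A (Python) =====
-- def expand_coordinates(record):
--     id, x, y, *_ = record
--     x, y = int(x), int(y)
--     results = []
--     for dx in range(-6, 7):
--         for dy in range(-6, 7):
--             if dx**2 + dy**2 <= 6**2:
--                 results.append(((x + dx, y + dy), id))
--     return results
-- ===== SOURCE B (Python) =====
-- def expand_coordinates(record):
--     id, x, y, *_ = record
--     x, y = int(x), int(y)
--     results = []
--     for dx in range(-6, 7):
--         b = 0
--         while (b + 1) * (b + 1) <= 36 - dx * dx: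
--             b += 1
--         for dy in range(-b, b + 1):
--             results.append(((x + dx, y + dy), id))
--     return results
-- ===== Notes on version B (the rewrite author's own statement) =====
-- stated objective: alternative
-- what changed: Replaces the 13x13 scan with the dx*dx+dy*dy<=36 filter by computing the exact integer row half-width b (integer sqrt of 36-dx*dx) per row and emitting only the valid dy range -b..b, so the inner predicate disappears.
import Mathlib
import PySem

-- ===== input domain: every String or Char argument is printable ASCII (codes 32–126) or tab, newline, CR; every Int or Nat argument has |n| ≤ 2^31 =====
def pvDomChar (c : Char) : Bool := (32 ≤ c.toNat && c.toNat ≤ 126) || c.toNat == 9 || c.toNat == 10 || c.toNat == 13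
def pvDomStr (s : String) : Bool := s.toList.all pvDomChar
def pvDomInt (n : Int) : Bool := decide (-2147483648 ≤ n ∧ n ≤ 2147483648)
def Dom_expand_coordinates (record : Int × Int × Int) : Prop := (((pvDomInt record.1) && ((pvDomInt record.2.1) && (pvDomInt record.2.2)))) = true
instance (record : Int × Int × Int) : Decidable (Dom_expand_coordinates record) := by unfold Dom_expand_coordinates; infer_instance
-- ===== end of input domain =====

-- B computes each row's exact half-width b (integer sqrt of 36-dx*dx) and emits only the valid dy span,
-- removing the per-cell dx²+dy² ≤ 36 test; same output list in the same order (objective: alternative).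

-- ===== PORT A =====
def expand_coordinates (record : Int × Int × Int) : List ((Int × Int) × Int) :=
  let (id, x, y) := record
  (PySem.List.pyRange (-6) 7 1).foldl (fun results dx =>
    (PySem.List.pyRange (-6) 7 1).foldl (fun results dy =>
      if dx ^ 2 + dy ^ 2 ≤ 6 ^ 2 then results ++ [((x + dx, y + dy), id)] else results)
      results) []

-- ===== PORT B =====
-- the 'while (b+1)*(b+1) <= n: b += 1' loop of Source B; fuel 7 is a totality guard (n ≤ 36 so at most 6 steps run)
def pvHalfWidthLoop (n : Int) (b : Int) : Nat → Int
  | 0 => b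
  | fuel + 1 => if (b + 1) * (b + 1) ≤ n then pvHalfWidthLoop n (b + 1) fuel else b

def expand_coordinates_alt (record : Int × Int × Int) : List ((Int × Int) × Int) :=
  let (id, x, y) := record
  (PySem.List.pyRange (-6) 7 1).foldl (fun results dx =>
    let b := pvHalfWidthLoop (36 - dx * dx) 0 7
    (PySem.List.pyRange (-b) (b + 1) 1).foldl (fun results dy =>
      results ++ [((x + dx, y + dy), id)]) results) []

-- ===== PRECONDITION & SPEC =====
def Spec_expand_coordinates (record : Int × Int × Int) (out : List ((Int × Int) × Int)) : Prop := out = expand_coordinates_alt record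
instance (record : Int × Int × Int) (out : List ((Int × Int) × Int)) : Decidable (Spec_expand_coordinates record out) := by unfold Spec_expand_coordinates; infer_instance

-- ===== CLAIM (what is proved, stated in full; the proofs are below) =====
def Claim_equal_expand_coordinates : Prop := ∀ (record : Int × Int × Int), Dom_expand_coordinates record → Spec_expand_coordinates record (expand_coordinates record)

-- ===== LEMMAS AND PROOFS =====
-- B's half-width equals the span of dy admitted by A's per-cell test, for each dx of the scan
theorem pvRow_eq (dx : Int) (h1 : -6 ≤ dx) (h2 : dx ≤ 6) :
    (PySem.List.pyRange (-6) 7 1).filter (fun dy => decide (dx ^ 2 + dy ^ 2 ≤ 6 ^ 2)) =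
    PySem.List.pyRange (-(pvHalfWidthLoop (36 - dx * dx) 0 7)) (pvHalfWidthLoop (36 - dx * dx) 0 7 + 1) 1 := by
  interval_cases dx <;> decide

theorem expand_coordinates_eq_alt (id x y : Int) :
    expand_coordinates (id, x, y) = expand_coordinates_alt (id, x, y) := by
  simp only [expand_coordinates, expand_coordinates_alt]
  apply PySem.List.foldl_congr_mem
  intro acc dx hdx
  rw [PySem.List.mem_pyRange_one] at hdx
  rw [show (fun (results : List ((Int × Int) × Int)) dy =>
        if dx ^ 2 + dy ^ 2 ≤ 6 ^ 2 then results ++ [((x + dx, y + dy), id)] else results)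
      = fun results dy =>
        if (fun dy => decide (dx ^ 2 + dy ^ 2 ≤ 6 ^ 2)) dy = true
        then results ++ [((x + dx, y + dy), id)] else results from by
        funext r dy; simp]
  rw [PySem.List.foldl_append_if, PySem.List.foldl_append_singleton_eq_map,
      pvRow_eq dx hdx.1 (by omega)]

-- ===== VERDICT (by name: the statement is the Claim_ definition above) =====
theorem expand_coordinates_spec : Claim_equal_expand_coordinates := by
  intro ⟨id, x, y⟩ _
  exact expand_coordinates_eq_alt id x y
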